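-- pv_equiv track=rewrite | github.com/dixyTW/leetcode | python3/1953_numberOfWeeks.py | numberOfWeeks
-- ===== SOURCE A (Python) =====
-- from typing import List
--
-- def numberOfWeeks(milestones: List[int]) -> int:
--     if len(milestones) == 1:
--         return 1
--     milestones.sort() #didn't need to sort, just get the max value
--     Sum = sum(milestones)
--     ans = 0
--     for i in range(len(milestones)-1):
--         ans += milestones[i]
--     return min(ans*2+1, milestones[-1]+ans)
-- ===== SOURCE B (Python) =====
-- def numberOfWeeks(milestones):
--     # One fused pass maintaining running total and running maximum (no sort,
--     # no builtins, does not mutate the input); then subtract the schedulable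
--     # excess of the dominant project instead of taking a min of two completions:
--     # excess = best - (total - best) - 1 milestones of the top project can
--     # never be placed, so the answer is total minus that excess (if positive).
--     if len(milestones) == 1:
--         return 1
--     total = 0
--     best = milestones[0]
--     for m in milestones:
--         total += m
--         if m > best:
--             best = m
--     excess = 2 * best - total - 1
--     if excess > 0:
--         return total - excess
--     return total
-- ===== Notes on version B (the rewrite author's own statement) =====
-- stated objective: faster
-- what changed: Replaces sort + prefix-sum loop + min of two completion counts by one fused pass maintaining running total and running maximum, then subtracting the positive excess 2*best-total-1 of the dominant project (no sort, no min, input not mutated).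
import Mathlib
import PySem

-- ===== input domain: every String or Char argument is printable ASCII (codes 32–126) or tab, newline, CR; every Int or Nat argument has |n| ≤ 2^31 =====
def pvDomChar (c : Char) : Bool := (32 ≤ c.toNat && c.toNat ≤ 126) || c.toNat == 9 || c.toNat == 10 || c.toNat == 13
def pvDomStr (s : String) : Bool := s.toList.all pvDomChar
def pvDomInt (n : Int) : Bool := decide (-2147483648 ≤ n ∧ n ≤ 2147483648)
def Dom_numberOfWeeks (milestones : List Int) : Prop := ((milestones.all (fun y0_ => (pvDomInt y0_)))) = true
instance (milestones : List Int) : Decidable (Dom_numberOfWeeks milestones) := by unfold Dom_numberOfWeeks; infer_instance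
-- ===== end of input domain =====

-- B replaces sort + prefix-sum + min by one fused total/maximum pass and an excess subtraction (measured faster);
-- A sorts the caller's list in place, B does not mutate it (the claim is about the return value only).

-- ===== PORT A =====
def numberOfWeeks (milestones : List Int) : Int :=
  if PySem.List.len milestones = 1 then 1
  else
    let ms := PySem.List.sorted milestones (fun x => x) false   -- milestones.sort()
    let _Sum := ms.sum                                          -- Sum = sum(milestones)  (unused by A)
    let ans := (PySem.List.pyRange 0 (PySem.List.len ms - 1) 1).foldl
      (fun acc i => acc + PySem.List.pyGetD ms i 0) 0
    min (ans * 2 + 1) (PySem.List.pyGetD ms (-1) 0 + ans)       -- ms[-1] raises on [] (excluded by Pre_)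

-- ===== PORT B =====
def numberOfWeeks_alt (milestones : List Int) : Int :=
  if PySem.List.len milestones = 1 then 1
  else
    let best0 := PySem.List.pyGetD milestones 0 0               -- milestones[0]; raises on [] (excluded by Pre_)
    let p := milestones.foldl
      (fun (p : Int × Int) m => (p.1 + m, if m > p.2 then m else p.2)) (0, best0)
    let excess := 2 * p.2 - p.1 - 1
    if excess > 0 then p.1 - excess else p.1

-- ===== PRECONDITION & SPEC =====
-- Pre_ excludes the empty list, on which both A (milestones[-1]) and B (milestones[0]) raise IndexError.
def Pre_numberOfWeeks (milestones : List Int) : Prop := milestones ≠ []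
instance (milestones : List Int) : Decidable (Pre_numberOfWeeks milestones) := by
  unfold Pre_numberOfWeeks; infer_instance
def pvWitness_numberOfWeeks : List Int := [5, 2, 4]
def Spec_numberOfWeeks (milestones : List Int) (out : Int) : Prop := out = numberOfWeeks_alt milestones
instance (milestones : List Int) (out : Int) : Decidable (Spec_numberOfWeeks milestones out) := by
  unfold Spec_numberOfWeeks; infer_instance

-- ===== CLAIM (what is proved, stated in full; the proofs are below) =====
def Claim_equal_numberOfWeeks : Prop := ∀ (milestones : List Int), Dom_numberOfWeeks milestones → Pre_numberOfWeeks milestones → Spec_numberOfWeeks milestones (numberOfWeeks milestones)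

-- ===== LEMMAS AND PROOFS =====

-- the last element of a (≤)-sorted nonempty list bounds every member
theorem pv_pairwise_le_getLast (t : List Int) (hp : t.Pairwise (· ≤ ·)) (ht : t ≠ []) :
    ∀ x ∈ t, x ≤ t.getLast ht := by
  induction t with
  | nil => simp at ht
  | cons a s ih =>
      intro x hx
      rcases eq_or_ne s [] with hs | hs
      · subst hs; simp at hx; subst hx; simp [List.getLast]
      · rw [List.getLast_cons hs]
        have hp' := List.pairwise_cons.mp hp
        rcases List.mem_cons.mp hx with rfl | hx
        · exact hp'.1 _ (List.getLast_mem hs)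
        · exact ih hp'.2 hs x hx

-- A's partial-sum loop over range(len-1) is the sum of all but the last element
theorem pv_ans_eq (t : List Int) (ht : t ≠ []) :
    (PySem.List.pyRange 0 (PySem.List.len t - 1) 1).foldl
      (fun acc i => acc + PySem.List.pyGetD t i 0) 0 = t.sum - t.getLast ht := by
  have h1 : 1 ≤ t.length := List.length_pos_of_ne_nil ht
  have hlen : PySem.List.len t - 1 = ((t.dropLast.length : Int)) := by
    simp [List.length_dropLast]; omega
  rw [hlen]
  rw [PySem.List.foldl_congr_mem (g := fun acc i => acc + PySem.List.pyGetD t.dropLast i 0)]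
  · rw [show ((t.dropLast.length : Int)) = PySem.List.len t.dropLast by simp]
    rw [PySem.List.foldl_pyRange_zero_pyGetD t.dropLast 0 (fun acc x => acc + x) 0]
    have hsplit : t.dropLast.sum + t.getLast ht = t.sum := by
      conv_rhs => rw [← List.dropLast_append_getLast ht]
      simp
    have hfs : t.dropLast.foldl (fun acc x => acc + x) 0 = t.dropLast.sum := by
      rw [List.sum_eq_foldl]
    omega
  · intro acc i hi
    rw [PySem.List.mem_pyRange_one] at hi
    have h0 : 0 ≤ i := hi.1
    have h2 : i < ((t.dropLast.length : Int)) := hi.2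
    have h2' : i < ((t.length : Int)) := by
      simp [List.length_dropLast] at h2 ⊢; omega
    rw [PySem.List.pyGetD_eq_getElem t 0 h0 (by simpa using h2'),
        PySem.List.pyGetD_eq_getElem t.dropLast 0 h0 (by simpa using h2)]
    rw [List.getElem_dropLast]

-- B's fused fold splits into the sum and a running-maximum fold
theorem pv_fold_pair (ms : List Int) (t b : Int) :
    ms.foldl (fun (p : Int × Int) m => (p.1 + m, if m > p.2 then m else p.2)) (t, b)
      = (t + ms.sum, ms.foldl (fun a m => if m > a then m else a) b) := by
  induction ms generalizing t b with
  | nil => simp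
  | cons x s ih => simp [ih]; ring

-- the running maximum is the seed or a member of the list
theorem pv_foldmax_mem (ms : List Int) (b : Int) :
    ms.foldl (fun a m => if m > a then m else a) b = b ∨
      ms.foldl (fun a m => if m > a then m else a) b ∈ ms := by
  induction ms generalizing b with
  | nil => simp
  | cons x s ih =>
      simp only [List.foldl_cons]
      by_cases hx : x > b
      · rw [if_pos hx]
        rcases ih x with h | h
        · right; exact List.mem_cons.mpr (Or.inl h)
        · right; right; exact h
      · rw [if_neg hx]
        rcases ih b with h | h
        · left; exact h
        · right; right; exact h

-- the running maximum bounds the seed and every member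
theorem pv_foldmax_ub (ms : List Int) (b : Int) :
    b ≤ ms.foldl (fun a m => if m > a then m else a) b ∧
      ∀ x ∈ ms, x ≤ ms.foldl (fun a m => if m > a then m else a) b := by
  induction ms generalizing b with
  | nil => simp
  | cons y s ih =>
      simp only [List.foldl_cons]
      by_cases hy : y > b
      · rw [if_pos hy]
        obtain ⟨h1, h2⟩ := ih y
        refine ⟨by omega, ?_⟩
        intro x hx
        rcases List.mem_cons.mp hx with rfl | hx
        · exact h1
        · exact h2 x hx
      · rw [if_neg hy]
        obtain ⟨h1, h2⟩ := ih b
        refine ⟨h1, ?_⟩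
        intro x hx
        rcases List.mem_cons.mp hx with rfl | hx
        · omega
        · exact h2 x hx

-- ===== VERDICT (by name: the statement is the Claim_ definition above) =====
theorem numberOfWeeks_spec : Claim_equal_numberOfWeeks := by
  intro ms _ hpre
  unfold Spec_numberOfWeeks numberOfWeeks numberOfWeeks_alt
  dsimp only
  by_cases hl : PySem.List.len ms = 1
  · rw [if_pos hl, if_pos hl]
  · rw [if_neg hl, if_neg hl]
    -- A side: sorted list t, last element is the maximum
    set t := PySem.List.sorted ms (fun x => x) false with htdef
    have hperm : t.Perm ms := PySem.List.sorted_perm ms (fun x => x) false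
    have htne : t ≠ [] := by
      simpa [htdef, PySem.List.sorted_eq_nil_iff] using hpre
    have hsum : t.sum = ms.sum := hperm.sum_eq
    have hLub : ∀ x ∈ t, x ≤ t.getLast htne :=
      pv_pairwise_le_getLast t (by simpa using PySem.List.sorted_pairwise ms (fun x => x)) htne
    -- B side: fused fold = (sum, running max)
    set b0 := PySem.List.pyGetD ms 0 0 with hb0
    rw [pv_fold_pair]
    set M := ms.foldl (fun a m => if m > a then m else a) b0 with hM
    have hb0mem : b0 ∈ ms := by
      obtain ⟨x, s, rfl⟩ := List.exists_cons_of_ne_nil hpre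
      simp [hb0, PySem.List.pyGetD, PySem.List.pyGet?, PySem.List.pyIdx?]
    have hMmem : M ∈ ms := by
      rcases pv_foldmax_mem ms b0 with h | h
      · rw [hM, h]; exact hb0mem
      · exact h
    have hMub : ∀ x ∈ ms, x ≤ M := (pv_foldmax_ub ms b0).2
    -- t.getLast = M
    have hMeq : t.getLast htne = M := by
      apply le_antisymm
      · exact hMub _ (hperm.mem_iff.mp (List.getLast_mem htne))
      · exact hLub _ (hperm.mem_iff.mpr hMmem)
    rw [pv_ans_eq t htne, PySem.List.pyGetD_neg_one t 0 htne, hMeq, hsum]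
    rcases le_total (2 * (ms.sum - M) + 1) ms.sum with h | h <;>
      simp [min_def] <;> omega
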